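-- pv_equiv track=rewrite | github.com/SubramanianLab/ecg-tsfm-benchmark | ecg_dataloader.py | _ordered_leads
-- ===== SOURCE A (Python) =====
-- from typing import Any, Dict, List, Optional, Sequence, Union
--
-- COMMON_MITBIH_LEADS = ["MLII", "V1", "V2", "V4", "V5"]
--
-- def _ordered_leads(leads: Sequence[str]) -> List[str]:
--     unique: List[str] = []
--     seen = set()
--     for lead in leads:
--         name = lead.strip()
--         if name and name not in seen:
--             unique.append(name)
--             seen.add(name)
--     priority = {lead: idx for idx, lead in enumerate(COMMON_MITBIH_LEADS)}
--     return sorted(unique, key=lambda lead: (priority.get(lead, 999), lead))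
-- ===== SOURCE B (Python) =====
-- from typing import List, Sequence
--
-- COMMON_MITBIH_LEADS = ["MLII", "V1", "V2", "V4", "V5"]
--
-- def _ordered_leads(leads: Sequence[str]) -> List[str]:
--     seen = set()
--     for lead in leads:
--         name = lead.strip()
--         if name:
--             seen.add(name)
--     front = [p for p in COMMON_MITBIH_LEADS if p in seen]
--     rest = sorted(seen.difference(COMMON_MITBIH_LEADS))
--     return front + rest
-- ===== Notes on version B (the rewrite author's own statement) =====
-- stated objective: simpler
-- what changed: Replaces the composite-key sort over the deduped list by a split: priority leads are collected by one pass over COMMON_MITBIH_LEADS in its fixed order, the remaining leads are sorted alphabetically, and the two parts are concatenated; the dedup list itself disappears (the seen-set suffices).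
import Mathlib
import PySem

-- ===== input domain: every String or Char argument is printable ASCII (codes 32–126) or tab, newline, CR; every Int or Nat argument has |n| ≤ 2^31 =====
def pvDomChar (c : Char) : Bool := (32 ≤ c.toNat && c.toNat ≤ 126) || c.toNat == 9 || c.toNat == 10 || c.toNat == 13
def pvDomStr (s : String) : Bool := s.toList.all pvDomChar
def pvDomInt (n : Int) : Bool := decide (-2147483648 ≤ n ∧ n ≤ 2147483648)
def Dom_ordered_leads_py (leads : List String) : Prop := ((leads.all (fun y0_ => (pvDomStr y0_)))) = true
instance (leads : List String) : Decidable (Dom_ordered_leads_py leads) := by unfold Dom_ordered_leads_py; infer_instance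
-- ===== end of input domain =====

-- B replaces A's composite-key sort by "priority leads in fixed order, then the rest sorted alphabetically" (objective: simpler).


-- ===== PORT A =====
def pvCOMMON : List String := ["MLII", "V1", "V2", "V4", "V5"]

-- priority = {lead: idx for idx, lead in enumerate(COMMON_MITBIH_LEADS)}
def pvPriority : PySem.Dict String Int :=
  (PySem.List.enumerate pvCOMMON).foldl (fun d p => d.insert p.2 p.1) PySem.Dict.empty

def ordered_leads_py (leads : List String) : List String :=
  let st := leads.foldl
    (fun (st : List String × PySem.Set String) lead =>
      let name := PySem.Str.strip lead
      if name ≠ "" ∧ name ∉ st.2 then (st.1 ++ [name], PySem.Set.add st.2 name) else st)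
    ([], PySem.Set.empty)
  PySem.List.sorted2 st.1 (fun lead => pvPriority.getD lead 999) (fun lead => lead) false

-- ===== PORT B =====
def ordered_leads_py_alt (leads : List String) : List String :=
  let seen := leads.foldl
    (fun (s : PySem.Set String) lead =>
      let name := PySem.Str.strip lead
      if name ≠ "" then PySem.Set.add s name else s)
    PySem.Set.empty
  let front := pvCOMMON.filter (fun p => PySem.Set.contains seen p)
  let rest := PySem.List.sorted (PySem.Set.diff seen pvCOMMON) (fun x => x) false
  front ++ rest

-- ===== PRECONDITION & SPEC =====
def Spec_ordered_leads_py (leads : List String) (out : List String) : Prop := out = ordered_leads_py_alt leads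
instance (leads : List String) (out : List String) : Decidable (Spec_ordered_leads_py leads out) := by unfold Spec_ordered_leads_py; infer_instance

-- ===== CLAIM (what is proved, stated in full; the proofs are below) =====
def Claim_equal_ordered_leads_py : Prop := ∀ (leads : List String), Dom_ordered_leads_py leads → Spec_ordered_leads_py leads (ordered_leads_py leads)

-- ===== LEMMAS AND PROOFS =====

-- the strict "(priority, name)"-lexicographic order A's sort realises
def pvLt (k1 : String → Int) (a b : String) : Prop :=
  k1 a < k1 b ∨ (k1 a = k1 b ∧ a < b)

lemma pvLt_asymm (k1 : String → Int) (a b : String) (h : pvLt k1 a b) : ¬ pvLt k1 b a := by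
  rcases h with h | ⟨h1, h2⟩ <;> rintro (h' | ⟨h1', h2'⟩) <;>
    first
      | omega
      | exact absurd h2' (not_lt.mpr h2.le)

lemma pvLt_trans (k1 : String → Int) (a b c : String) (h : pvLt k1 a b) (h' : pvLt k1 b c) :
    pvLt k1 a c := by
  rcases h with h | ⟨h1, h2⟩ <;> rcases h' with h' | ⟨h1', h2'⟩
  · exact Or.inl (h.trans h')
  · exact Or.inl (h1' ▸ h)
  · exact Or.inl (h1 ▸ h')
  · exact Or.inr ⟨h1.trans h1', h2.trans h2'⟩

lemma pvLt_of_ne (k1 : String → Int) (a b : String) (h : a ≠ b) :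
    pvLt k1 a b ∨ pvLt k1 b a := by
  rcases lt_trichotomy (k1 a) (k1 b) with hk | hk | hk
  · exact Or.inl (Or.inl hk)
  · rcases lt_or_gt_of_ne h with hs | hs
    · exact Or.inl (Or.inr ⟨hk, hs⟩)
    · exact Or.inr (Or.inr ⟨hk.symm, hs⟩)
  · exact Or.inr (Or.inl hk)

-- boolean comparator used by sorted2, characterised through pvLt
def pvBefore (k1 : String → Int) (a b : String) : Bool :=
  decide (k1 a < k1 b) || (!decide (k1 b < k1 a) && decide (a < b))

lemma pvBefore_eq_true_iff (k1 : String → Int) (a b : String) :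
    pvBefore k1 a b = true ↔ pvLt k1 a b := by
  unfold pvBefore pvLt
  simp only [Bool.or_eq_true, Bool.and_eq_true, Bool.not_eq_true', decide_eq_true_eq,
    decide_eq_false_iff_not]
  constructor
  · rintro (h | ⟨h1, h2⟩)
    · exact Or.inl h
    · rcases eq_or_lt_of_le (not_lt.mp h1) with he | hl
      · exact Or.inr ⟨he, h2⟩
      · exact Or.inl hl
  · rintro (h | ⟨h1, h2⟩)
    · exact Or.inl h
    · exact Or.inr ⟨not_lt.mpr (le_of_eq h1), h2⟩

lemma pv_insertBy_pairwise (k1 : String → Int) (x : String) (ys : List String)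
    (h : ys.Pairwise (fun a b => ¬ pvLt k1 b a)) :
    (PySem.List.insertBy (pvBefore k1) x ys).Pairwise (fun a b => ¬ pvLt k1 b a) := by
  induction ys with
  | nil => simp [PySem.List.insertBy]
  | cons y ys ih =>
    rcases List.pairwise_cons.mp h with ⟨hy, hys⟩
    rw [PySem.List.insertBy.eq_2]
    by_cases hb : pvBefore k1 x y = true
    · rw [if_pos hb]
      have hxy : pvLt k1 x y := (pvBefore_eq_true_iff k1 x y).mp hb
      refine List.pairwise_cons.mpr ⟨?_, h⟩
      intro z hz
      rcases List.mem_cons.mp hz with rfl | hz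
      · exact pvLt_asymm k1 x z hxy
      · exact fun hzx => hy z hz (pvLt_trans k1 z x y hzx hxy)
    · rw [if_neg hb]
      refine List.pairwise_cons.mpr ⟨?_, ih hys⟩
      intro z hz
      rcases (PySem.List.mem_insertBy (pvBefore k1) x z ys).mp hz with he | hz
      · subst he
        exact fun hxy => hb ((pvBefore_eq_true_iff k1 z y).mpr hxy)
      · exact hy z hz

lemma pv_foldl_insertBy_pairwise (k1 : String → Int) (xs acc : List String)
    (h : acc.Pairwise (fun a b => ¬ pvLt k1 b a)) :
    (xs.foldl (fun acc x => PySem.List.insertBy (pvBefore k1) x acc) acc).Pairwise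
      (fun a b => ¬ pvLt k1 b a) := by
  induction xs generalizing acc with
  | nil => exact h
  | cons x xs ih => exact ih _ (pv_insertBy_pairwise k1 x acc h)

-- the characterisation of A's sort: any pvLt-sorted rearrangement of xs IS sorted2 xs
lemma pv_sorted2_eq (k1 : String → Int) (xs ys : List String)
    (hp : ys.Perm xs) (hpw : ys.Pairwise (pvLt k1)) :
    PySem.List.sorted2 xs k1 (fun x => x) false = ys := by
  have e : PySem.List.sorted2 xs k1 (fun x => x) false
      = xs.foldl (fun acc x => PySem.List.insertBy (pvBefore k1) x acc) [] := rfl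
  rw [e]
  refine List.Perm.eq_of_pairwise (le := fun a b => ¬ pvLt k1 b a) ?_ ?_ ?_ ?_
  · intro a b _ _ hab hba
    by_contra hne
    rcases pvLt_of_ne k1 a b (fun h => hne h) with h | h
    · exact hba h
    · exact hab h
  · exact pv_foldl_insertBy_pairwise k1 xs [] (by simp)
  · exact hpw.imp (fun {a b} h => pvLt_asymm k1 a b h)
  · exact ((PySem.List.foldl_insertBy_perm (pvBefore k1) xs []).trans (by simp)).trans hp.symm

-- A's dedup loop carries the unique list and the seen set in lockstep: both equal B's seen set
lemma pv_fold_state (leads : List String) (s : PySem.Set String) :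
    leads.foldl
      (fun (st : List String × PySem.Set String) lead =>
        let name := PySem.Str.strip lead
        if name ≠ "" ∧ name ∉ st.2 then (st.1 ++ [name], PySem.Set.add st.2 name) else st)
      (s, s)
    = (leads.foldl
        (fun (t : PySem.Set String) lead =>
          let name := PySem.Str.strip lead
          if name ≠ "" then PySem.Set.add t name else t) s,
       leads.foldl
        (fun (t : PySem.Set String) lead =>
          let name := PySem.Str.strip lead
          if name ≠ "" then PySem.Set.add t name else t) s) := by
  induction leads generalizing s with
  | nil => rfl
  | cons lead leads ih =>
    simp only [List.foldl_cons]
    by_cases h1 : PySem.Str.strip lead = ""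
    · rw [if_neg (by simp [h1]), if_neg (by simp [h1])]
      exact ih s
    · by_cases h2 : PySem.Str.strip lead ∈ s
      · rw [if_neg (by simp [h2]), if_pos h1, PySem.Set.add_of_mem h2]
        exact ih s
      · rw [if_pos ⟨h1, h2⟩, if_pos h1, PySem.Set.add_of_not_mem h2]
        exact ih (s ++ [PySem.Str.strip lead])

lemma pv_fold_nodup (leads : List String) (s : PySem.Set String) (hs : s.Nodup) :
    (leads.foldl
      (fun (t : PySem.Set String) lead =>
        let name := PySem.Str.strip lead
        if name ≠ "" then PySem.Set.add t name else t) s).Nodup := by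
  induction leads generalizing s with
  | nil => exact hs
  | cons lead leads ih =>
    simp only [List.foldl_cons]
    split
    · exact ih _ (PySem.Set.nodup_add _ _ hs)
    · exact ih _ hs

lemma pv_k1_mem : ∀ a ∈ pvCOMMON, pvPriority.getD a 999 < 999 := by decide

lemma pv_k1_not_mem (a : String) (h : a ∉ pvCOMMON) : pvPriority.getD a 999 = 999 := by
  have e : pvPriority
      = ((((PySem.Dict.empty.insert "MLII" 0).insert "V1" 1).insert "V2" 2).insert
          "V4" 3).insert "V5" 4 := rfl
  simp only [pvCOMMON, List.mem_cons, not_or] at h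
  obtain ⟨h1, h2, h3, h4, h5, -⟩ := h
  rw [e]
  rw [PySem.Dict.getD_insert, if_neg h5, PySem.Dict.getD_insert, if_neg h4,
    PySem.Dict.getD_insert, if_neg h3, PySem.Dict.getD_insert, if_neg h2,
    PySem.Dict.getD_insert, if_neg h1]
  simp [PySem.Dict.getD, PySem.Dict.get?, PySem.Dict.empty]

lemma pv_pairwise_common : pvCOMMON.Pairwise (pvLt (fun l => pvPriority.getD l 999)) := by
  unfold pvLt; decide

-- the heart of the equivalence, for an arbitrary duplicate-free seen set
lemma pv_main (seen : PySem.Set String) (hnodup : seen.Nodup) :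
    PySem.List.sorted2 seen (fun l => pvPriority.getD l 999) (fun lead => lead) false
    = pvCOMMON.filter (fun p => PySem.Set.contains seen p)
      ++ PySem.List.sorted (PySem.Set.diff seen pvCOMMON) (fun x => x) false := by
  set k1 : String → Int := fun l => pvPriority.getD l 999 with hk1
  set front : List String := pvCOMMON.filter (fun p => PySem.Set.contains seen p) with hfront
  set rest : List String := PySem.List.sorted (PySem.Set.diff seen pvCOMMON) (fun x => x) false
    with hrest
  have hmem_front : ∀ a, a ∈ front ↔ a ∈ pvCOMMON ∧ a ∈ seen := by
    intro a
    simp [hfront, List.mem_filter]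
  have hmem_rest : ∀ a, a ∈ rest ↔ a ∈ seen ∧ a ∉ pvCOMMON := by
    intro a
    simp [hrest, PySem.List.mem_sorted, PySem.Set.mem_diff]
  -- permutation
  have hperm : (front ++ rest).Perm seen := by
    have h1 : front.Perm (seen.filter (fun n => List.contains pvCOMMON n)) := by
      rw [List.perm_ext_iff_of_nodup
        (List.Nodup.filter _ (by decide)) (List.Nodup.filter _ hnodup)]
      intro a
      rw [hmem_front a]
      simp [List.mem_filter, And.comm]
    have h2 : rest.Perm (seen.filter (fun n => !List.contains pvCOMMON n)) := by
      have hsp := PySem.List.sorted_perm (PySem.Set.diff seen pvCOMMON) (fun x => x) false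
      rw [← hrest] at hsp
      simpa [PySem.Set.diff, PySem.Set.contains] using hsp
    exact (h1.append h2).trans (List.filter_append_perm _ seen)
  -- pairwise strict lexicographic order
  have hpw : (front ++ rest).Pairwise (pvLt k1) := by
    rw [List.pairwise_append]
    refine ⟨List.Pairwise.filter _ pv_pairwise_common, ?_, ?_⟩
    · have hsort := PySem.List.sorted_pairwise (PySem.Set.diff seen pvCOMMON) (fun x => x)
      rw [← hrest] at hsort
      have hnd : rest.Nodup :=
        (PySem.List.sorted_perm _ _ _).nodup_iff.mpr
          (PySem.Set.nodup_diff seen pvCOMMON hnodup)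
      refine (hsort.and hnd).imp_of_mem ?_
      intro a b ha hb hab
      right
      refine ⟨?_, lt_of_le_of_ne hab.1 hab.2⟩
      show pvPriority.getD a 999 = pvPriority.getD b 999
      rw [pv_k1_not_mem a ((hmem_rest a).mp ha).2, pv_k1_not_mem b ((hmem_rest b).mp hb).2]
    · intro a ha b hb
      left
      show pvPriority.getD a 999 < pvPriority.getD b 999
      rw [pv_k1_not_mem b ((hmem_rest b).mp hb).2]
      exact pv_k1_mem a ((hmem_front a).mp ha).1
  exact pv_sorted2_eq k1 seen (front ++ rest) hperm hpw

-- ===== VERDICT (by name: the statement is the Claim_ definition above) =====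
theorem ordered_leads_py_spec : Claim_equal_ordered_leads_py := by
  intro leads _hdom
  unfold Spec_ordered_leads_py ordered_leads_py ordered_leads_py_alt
  rw [show (([], PySem.Set.empty) : List String × PySem.Set String)
        = (PySem.Set.empty, PySem.Set.empty) from rfl,
      pv_fold_state leads PySem.Set.empty]
  exact pv_main _ (pv_fold_nodup leads PySem.Set.empty (by simp [PySem.Set.empty]))
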